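-- pv_equiv track=rewrite | github.com/Revi1337/BaekJoon-Coding-Test | 백준/Silver/1544. 사이클 단어/사이클 단어.py | solution
-- ===== SOURCE A (Python) =====
-- from collections import deque
--
-- def solution(N, words):
--     answer = 0
--     cache = set()
--     for word in words:
--         if word not in cache:
--             answer += 1
--             cache.add(word)
--
--         queue = deque(word)
--         for _ in range(len(word)):
--             queue.rotate(-1)
--             string = "".join(queue)
--             cache.add(string)
--
--     return answer
-- ===== SOURCE B (Python) =====
-- def canon(word):
--     # canonical representative of the rotation class: the lexicographically
--     # smallest rotation of word
--     if not word:
--         return word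
--     return min(word[i:] + word[:i] for i in range(len(word)))
--
--
-- def solution(N, words):
--     return len({canon(w) for w in words})
-- ===== Notes on version B (the rewrite author's own statement) =====
-- stated objective: simpler
-- what changed: Instead of A's incremental cache that enumerates and stores every rotation of every word with a deque and counts first-seen words, B maps each word to a canonical representative (its lexicographically smallest rotation) and returns the size of the set of canonical forms.
import Mathlib
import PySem

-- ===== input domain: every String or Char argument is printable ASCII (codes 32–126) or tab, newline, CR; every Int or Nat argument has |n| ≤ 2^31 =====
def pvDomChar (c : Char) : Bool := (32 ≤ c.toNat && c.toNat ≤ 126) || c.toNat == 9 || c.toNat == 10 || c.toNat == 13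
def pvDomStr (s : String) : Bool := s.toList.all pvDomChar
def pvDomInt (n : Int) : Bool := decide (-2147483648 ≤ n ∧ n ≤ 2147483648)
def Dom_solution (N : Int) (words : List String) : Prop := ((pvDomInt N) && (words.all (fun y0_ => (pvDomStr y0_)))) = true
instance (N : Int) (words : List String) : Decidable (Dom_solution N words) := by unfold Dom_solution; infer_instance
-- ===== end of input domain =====

-- B replaces A's incremental cache of all rotations by a canonical form
-- (lexicographically smallest rotation) per word and counts distinct canonical
-- forms; objective: simpler (no speed claim).


-- ===== PORT A =====
-- queue.rotate(-1) on a deque of characters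
def rotLeft1 (q : List Char) : List Char :=
  match q with
  | [] => []
  | c :: r => r ++ [c]

-- one iteration of A's inner loop body: rotate, join, add to the cache
def innerStep (qc : List Char × PySem.Set String) : List Char × PySem.Set String :=
  let q := rotLeft1 qc.1
  (q, qc.2.add (String.ofList q))   -- "".join of a char deque, exact

-- one iteration of A's outer loop body ('for word in words')
def stepA (st : Int × PySem.Set String) (word : String) : Int × PySem.Set String :=
  let answer := st.1
  let cache := st.2
  let answer := if cache.contains word then answer else answer + 1
  let cache := if cache.contains word then cache else cache.add word
  -- queue = deque(word); for _ in range(len(word)): queue.rotate(-1); cache.add("".join(queue))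
  let qc := (PySem.List.pyRange 0 (PySem.Str.len word)).foldl
    (fun qc _ => innerStep qc) (word.toList, cache)
  (answer, qc.2)

def solution (N : Int) (words : List String) : Int :=
  (words.foldl stepA (0, PySem.Set.empty)).1

-- ===== PORT B =====
-- the rotations word[i:] + word[:i] for i in range(len(word)); '+' on str is
-- list append on the code points, ported exactly via String.ofList
def rotationsB (word : String) : List String :=
  (PySem.List.pyRange 0 (PySem.Str.len word)).map
    (fun i => String.ofList ((PySem.Str.slice word (some i) none).toList
                              ++ (PySem.Str.slice word none (some i)).toList))

-- min(...) of the (nonempty, when word ≠ "") list of rotations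
def canonB (word : String) : String :=
  if PySem.Str.len word = 0 then word
  else (PySem.List.min? (rotationsB word) (fun s => s)).getD word
  -- the list is nonempty here, so min? is always `some`; .getD never takes its default

def solution_alt (N : Int) (words : List String) : Int :=
  PySem.Set.len (PySem.Set.ofList (words.map canonB))

-- ===== PRECONDITION & SPEC =====
def Spec_solution (N : Int) (words : List String) (out : Int) : Prop := out = solution_alt N words
instance (N : Int) (words : List String) (out : Int) : Decidable (Spec_solution N words out) := by unfold Spec_solution; infer_instance

-- ===== CLAIM (what is proved, stated in full; the proofs are below) =====
def Claim_equal_solution : Prop := ∀ (N : Int) (words : List String), Dom_solution N words → Spec_solution N words (solution N words)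

-- ===== LEMMAS AND PROOFS =====

theorem set_contains_iff {α : Type} [BEq α] [LawfulBEq α] (s : PySem.Set α) (x : α) :
    s.contains x = true ↔ x ∈ s := by
  simp [PySem.Set.contains]

theorem set_len_add {α : Type} [BEq α] [LawfulBEq α] (s : PySem.Set α) (x : α) :
    PySem.Set.len (s.add x) = PySem.Set.len s + (if x ∈ s then 0 else 1) := by
  by_cases h : x ∈ s <;>
    simp [PySem.Set.len, PySem.Set.add, PySem.Set.contains, h]

-- rotLeft1 is List.rotate by one
theorem rotLeft1_eq_rotate (q : List Char) : rotLeft1 q = q.rotate 1 := by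
  cases q with
  | nil => simp [rotLeft1]
  | cons c r => simp [rotLeft1, List.rotate_cons_succ]

-- folding a constant step over a list is iteration by its length
theorem foldl_const {α β : Type} (f : α → α) (xs : List β) (init : α) :
    xs.foldl (fun st _ => f st) init = f^[xs.length] init := by
  induction xs generalizing init with
  | nil => rfl
  | cons x t ih => simp [List.foldl_cons, ih, Function.iterate_succ_apply]

-- the state of A's inner loop after k iterations
theorem innerA_spec (k : Nat) :
    ∀ (q : List Char) (C : PySem.Set String),
    (innerStep^[k] (q, C)).1 = q.rotate k ∧
    (∀ s : String, s ∈ (innerStep^[k] (q, C)).2 ↔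
        s ∈ C ∨ ∃ i : Nat, 1 ≤ i ∧ i ≤ k ∧ s = String.ofList (q.rotate i)) := by
  induction k with
  | zero =>
    intro q C
    refine ⟨by simp, ?_⟩
    intro s
    simp only [Function.iterate_zero, id]
    constructor
    · exact fun h => Or.inl h
    · rintro (h | ⟨i, h1, h2, _⟩)
      · exact h
      · omega
  | succ k ih =>
    intro q C
    rw [Function.iterate_succ_apply]
    have hstep : innerStep (q, C) = (q.rotate 1, C.add (String.ofList (q.rotate 1))) := by
      simp [innerStep, rotLeft1_eq_rotate]
    rw [hstep]
    obtain ⟨h1, h2⟩ := ih (q.rotate 1) (C.add (String.ofList (q.rotate 1)))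
    constructor
    · rw [h1, List.rotate_rotate]; ring_nf
    · intro s
      rw [h2 s, PySem.Set.mem_add]
      constructor
      · rintro (⟨hC | hw⟩ | ⟨i, hi1, hik, hs⟩)
        · exact Or.inl hC
        · exact Or.inr ⟨1, le_refl 1, by omega, hw⟩
        · refine Or.inr ⟨i + 1, by omega, by omega, ?_⟩
          rw [hs, List.rotate_rotate]; ring_nf
      · rintro (hC | ⟨i, hi1, hik, hs⟩)
        · exact Or.inl (Or.inl hC)
        · by_cases hone : i = 1
          · subst hone; exact Or.inl (Or.inr hs)
          · refine Or.inr ⟨i - 1, by omega, by omega, ?_⟩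
            have hi : (1 : Nat) + (i - 1) = i := by omega
            rw [hs, List.rotate_rotate, hi]

-- rotation classes: the strings A's loop body admits are exactly the rotations
theorem word_class (w s : String) :
    (s = w ∨ ∃ i : Nat, 1 ≤ i ∧ i ≤ w.toList.length ∧ s = String.ofList (w.toList.rotate i)) ↔
      List.IsRotated w.toList s.toList := by
  constructor
  · rintro (rfl | ⟨i, _, _, rfl⟩)
    · exact List.IsRotated.refl _
    · exact ⟨i, by simp⟩
  · rintro ⟨n, hn⟩
    by_cases hL : w.toList.length = 0
    · left
      have hw : w.toList = [] := List.length_eq_zero_iff.mp hL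
      have : s.toList = [] := by rw [← hn, hw]; simp
      have h1 : String.ofList s.toList = String.ofList w.toList := by rw [this, hw]
      simpa [String.ofList_toList] using h1
    · by_cases hm : n % w.toList.length = 0
      · left
        have : w.toList.rotate n = w.toList := by
          rw [← List.rotate_mod, hm, List.rotate_zero]
        have h1 : String.ofList s.toList = String.ofList w.toList := by rw [← hn, this]
        simpa [String.ofList_toList] using h1
      · right
        refine ⟨n % w.toList.length, by omega,
          le_of_lt (Nat.mod_lt _ (by omega)), ?_⟩
        rw [List.rotate_mod, hn, String.ofList_toList]

-- membership in the cache after one outer-loop iteration of A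
theorem stepA_snd (ans : Int) (C : PySem.Set String) (w : String) :
    (stepA (ans, C) w).2 =
      (innerStep^[w.toList.length]
        (w.toList, if C.contains w then C else C.add w)).2 := by
  have hlen : (PySem.List.pyRange 0 (PySem.Str.len w)).length = w.toList.length := by
    rw [PySem.Str.len_eq, PySem.List.length_pyRange_one]
    omega
  simp only [stepA]
  rw [foldl_const innerStep, hlen]

theorem stepA_cache_mem (ans : Int) (C : PySem.Set String) (w s : String) :
    s ∈ (stepA (ans, C) w).2 ↔ s ∈ C ∨ List.IsRotated w.toList s.toList := by
  rw [stepA_snd]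
  obtain ⟨-, hmem⟩ := innerA_spec w.toList.length w.toList
    (if C.contains w then C else C.add w)
  rw [hmem s]
  have hC0 : s ∈ (if C.contains w then C else C.add w) ↔ s ∈ C ∨ s = w := by
    by_cases h : C.contains w = true
    · simp only [h, if_pos]
      constructor
      · exact fun hs => Or.inl hs
      · rintro (hs | rfl)
        · exact hs
        · exact (set_contains_iff C s).mp h
    · simp only [h, if_neg, Bool.false_eq_true, not_false_iff]
      exact PySem.Set.mem_add C w s
  rw [hC0]
  rw [← word_class w s]
  tauto

theorem stepA_fst (ans : Int) (C : PySem.Set String) (w : String) :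
    (stepA (ans, C) w).1 = if w ∈ C then ans else ans + 1 := by
  simp only [stepA]
  by_cases h : w ∈ C
  · rw [if_pos ((set_contains_iff C w).mpr h), if_pos h]
  · rw [if_neg (fun hc => h ((set_contains_iff C w).mp hc)), if_neg h]

-- membership in B's rotation list
theorem mem_rotationsB (w s : String) (hw : w.toList.length ≠ 0) :
    s ∈ rotationsB w ↔ List.IsRotated w.toList s.toList := by
  have hchar : s ∈ rotationsB w ↔
      ∃ k : Nat, k < w.toList.length ∧ s = String.ofList (w.toList.rotate k) := by
    unfold rotationsB
    rw [List.mem_map]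
    constructor
    · rintro ⟨i, hi, rfl⟩
      rw [PySem.List.mem_pyRange_one] at hi
      obtain ⟨hi0, hiL⟩ := hi
      refine ⟨i.toNat, ?_, ?_⟩
      · rw [PySem.Str.len_eq] at hiL; omega
      · have hcast : i = ((i.toNat : Nat) : Int) := by omega
        rw [hcast, PySem.Str.toList_slice, PySem.Str.toList_slice,
          PySem.Chars.slice_eq_listSlice, PySem.Chars.slice_eq_listSlice,
          PySem.List.slice_from_natCast, PySem.List.slice_to_natCast,
          List.rotate_eq_drop_append_take (by rw [PySem.Str.len_eq] at hiL; omega)]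
        simp
        rw [max_eq_left hi0]
    · rintro ⟨k, hk, rfl⟩
      refine ⟨(k : Int), ?_, ?_⟩
      · rw [PySem.List.mem_pyRange_one, PySem.Str.len_eq]; omega
      · rw [PySem.Str.toList_slice, PySem.Str.toList_slice,
          PySem.Chars.slice_eq_listSlice, PySem.Chars.slice_eq_listSlice,
          PySem.List.slice_from_natCast, PySem.List.slice_to_natCast,
          List.rotate_eq_drop_append_take (le_of_lt hk)]
  rw [hchar]
  constructor
  · rintro ⟨k, _, rfl⟩
    exact ⟨k, by simp⟩
  · rintro ⟨n, hn⟩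
    refine ⟨n % w.toList.length, Nat.mod_lt _ (by omega), ?_⟩
    rw [List.rotate_mod, hn, String.ofList_toList]

theorem rotationsB_ne_nil (w : String) (hw : w.toList.length ≠ 0) :
    rotationsB w ≠ [] := by
  have h2 : (rotationsB w).length = w.toList.length := by
    unfold rotationsB
    rw [List.length_map, PySem.List.length_pyRange_one, PySem.Str.len_eq]
    omega
  intro h
  rw [h] at h2
  have : w.toList.length = 0 := by simpa using h2.symm
  exact hw this

theorem canonB_eq_min (w : String) (hw : w.toList.length ≠ 0) :
    PySem.List.min? (rotationsB w) (fun s => s) = some (canonB w) := by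
  rcases hm : PySem.List.min? (rotationsB w) (fun s => s) with _ | m
  · exact absurd ((PySem.List.min?_eq_none_iff _ _).mp hm) (rotationsB_ne_nil w hw)
  · have : canonB w = m := by
      unfold canonB
      rw [if_neg (by rw [PySem.Str.len_eq]; omega), hm]
      rfl
    rw [this]

-- the canonical form is in the class and minimal in it
theorem canonB_isRotated (w : String) : List.IsRotated w.toList (canonB w).toList := by
  by_cases hw : w.toList.length = 0
  · have hcan : canonB w = w := by
      unfold canonB
      rw [if_pos (by rw [PySem.Str.len_eq]; omega)]
    rw [hcan]
  · exact (mem_rotationsB w (canonB w) hw).mp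
      (PySem.List.min?_mem (canonB_eq_min w hw))

theorem canonB_min (w s : String) (h : List.IsRotated w.toList s.toList) : canonB w ≤ s := by
  by_cases hw : w.toList.length = 0
  · have hwnil : w.toList = [] := List.length_eq_zero_iff.mp hw
    have hs : s.toList = [] := by
      obtain ⟨n, hn⟩ := h
      rw [hwnil] at hn
      simpa using hn.symm
    have hsw : s = w := by
      have := congrArg String.ofList (hs.trans hwnil.symm)
      simpa [String.ofList_toList] using this
    have hcan : canonB w = w := by
      unfold canonB
      rw [if_pos (by rw [PySem.Str.len_eq]; omega)]
    rw [hsw, hcan]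
  · exact PySem.List.min?_isMin (canonB_eq_min w hw) s
      ((mem_rotationsB w s hw).mpr h)

-- canonical forms agree exactly on rotation classes
theorem canonB_eq_iff (w v : String) :
    canonB w = canonB v ↔ List.IsRotated w.toList v.toList := by
  constructor
  · intro h
    have h1 : List.IsRotated w.toList (canonB v).toList := by
      rw [← h]; exact canonB_isRotated w
    exact h1.trans (canonB_isRotated v).symm
  · intro h
    have h1 : canonB w ≤ canonB v :=
      canonB_min w (canonB v) (h.trans (canonB_isRotated v))
    have h2 : canonB v ≤ canonB w :=
      canonB_min v (canonB w) (h.symm.trans (canonB_isRotated w))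
    exact le_antisymm h1 h2

-- main loop invariant: the A-state (answer, cache) corresponds to B's set of
-- canonical forms S: answer = |S| and cache membership tests canonical membership
theorem main_loop (ws : List String) :
    ∀ (ans : Int) (C S : PySem.Set String),
    (∀ s : String, s ∈ C ↔ canonB s ∈ S) → ans = PySem.Set.len S →
    (ws.foldl stepA (ans, C)).1 =
      PySem.Set.len (ws.foldl (fun S w => S.add (canonB w)) S) := by
  induction ws with
  | nil => intro ans C S _ hlen; simpa using hlen
  | cons w t ih =>
    intro ans C S hmem hlen
    rw [List.foldl_cons, List.foldl_cons]
    have hA : ∀ s : String, s ∈ (stepA (ans, C) w).2 ↔ canonB s ∈ S.add (canonB w) := by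
      intro s
      rw [stepA_cache_mem ans C w s, hmem s, PySem.Set.mem_add]
      have h2 : List.IsRotated w.toList s.toList ↔ canonB s = canonB w := by
        rw [canonB_eq_iff s w]
        exact ⟨fun h => h.symm, fun h => h.symm⟩
      rw [h2]
    have hN : (stepA (ans, C) w).1 = PySem.Set.len (S.add (canonB w)) := by
      rw [stepA_fst ans C w, set_len_add, hlen]
      by_cases h : w ∈ C
      · rw [if_pos h, if_pos ((hmem w).mp h)]
        omega
      · rw [if_neg h, if_neg (fun hc => h ((hmem w).mpr hc))]
    exact ih _ _ _ hA hN

-- ===== VERDICT (by name: the statement is the Claim_ definition above) =====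
theorem solution_spec : Claim_equal_solution := by
  intro N words _
  unfold Spec_solution solution solution_alt
  rw [PySem.Set.ofList_eq_foldl, List.foldl_map]
  exact main_loop words 0 PySem.Set.empty PySem.Set.empty
    (by intro s; simp [PySem.Set.empty]) (by simp [PySem.Set.len, PySem.Set.empty])
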